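-- pv_equiv track=rewrite | github.com/JeanPaulRF/IO | Proyecto 2/EjerciciosArrays.py | supersecuencia_palindromo_mas_corta
-- ===== SOURCE A (Python) =====
-- def supersecuencia_palindromo_mas_corta(s):
--     n = len(s)
--     rev_s = s[::-1]
--     dp = [[0] * (n+1) for _ in range(n+1)]
--     for i in range(1, n+1):
--         for j in range(1, n+1):
--             if s[i-1] == rev_s[j-1]:
--                 dp[i][j] = dp[i-1][j-1] + 1
--             else:
--                 dp[i][j] = max(dp[i-1][j], dp[i][j-1])
--     return n + n - dp[n][n]
-- ===== SOURCE B (Python) =====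
-- def supersecuencia_palindromo_mas_corta(s):
--     # Dual formulation with a rolling row: minimum insert/delete edit distance
--     # between s and its reverse (indexed in place), keeping only the previous
--     # row and building each row by appending; answer = n + dist // 2.
--     n = len(s)
--     prev = list(range(n + 1))
--     for i in range(1, n + 1):
--         cur = [i]
--         for j in range(1, n + 1):
--             if s[i-1] == s[n-j]:
--                 cur.append(prev[j-1])
--             else:
--                 cur.append(1 + min(prev[j], cur[j-1]))
--         prev = cur
--     return n + prev[n] // 2
-- ===== Notes on version B (the rewrite author's own statement) =====
-- stated objective: alternative
-- what changed: Replaces A's 2D LCS(s, reversed s) maximisation table (answer 2n - dp[n][n]) by the dual minimisation recurrence -- the insert/delete edit distance between s and its in-place-indexed reverse -- computed with a rolling single row built by appending (O(n) memory, no 2D table, no reversed copy), returning n + dist//2.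
import Mathlib
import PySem

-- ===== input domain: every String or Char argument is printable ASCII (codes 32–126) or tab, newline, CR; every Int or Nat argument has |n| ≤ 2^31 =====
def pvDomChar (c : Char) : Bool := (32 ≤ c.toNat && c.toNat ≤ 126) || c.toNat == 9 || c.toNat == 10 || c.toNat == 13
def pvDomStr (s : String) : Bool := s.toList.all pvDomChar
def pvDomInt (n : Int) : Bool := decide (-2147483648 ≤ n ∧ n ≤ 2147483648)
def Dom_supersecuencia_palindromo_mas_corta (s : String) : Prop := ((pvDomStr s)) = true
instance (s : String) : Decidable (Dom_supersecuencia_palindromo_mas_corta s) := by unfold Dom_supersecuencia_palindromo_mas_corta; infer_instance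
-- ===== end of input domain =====

-- B replaces A's 2D LCS(s, reversed-s) maximisation table by its dual: the minimum
-- insert/delete edit distance between s and its in-place-indexed reverse, computed with a
-- rolling single row built by appending (no 2D table, no reversed copy), returning
-- n + dist//2 — a different recurrence and data structure of similar time cost (alternative).

-- ===== PORT A =====
-- A-side 2D-table primitives (Python's dp[i][j] read / write on a list of lists)
def pvRd (dp : List (List Int)) (i j : Nat) : Int := (dp.getD i []).getD j 0
def pvWr (dp : List (List Int)) (i j : Nat) (v : Int) : List (List Int) :=
  dp.set i ((dp.getD i []).set j v)

def supersecuencia_palindromo_mas_corta (s : String) : Int :=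
  let cs := s.toList
  let n := cs.length
  let rev := cs.reverse                                   -- rev_s = s[::-1]
  let dp0 := List.replicate (n+1) (List.replicate (n+1) (0:Int))
  let dp := (PySem.List.pyRange 1 ((n:Int)+1) 1).foldl (fun dp i =>
    (PySem.List.pyRange 1 ((n:Int)+1) 1).foldl (fun dp j =>
      if cs.getD (i-1).toNat ' ' = rev.getD (j-1).toNat ' ' then   -- s[i-1] == rev_s[j-1]; indices provably ≥ 0 and in range
        pvWr dp i.toNat j.toNat (pvRd dp (i-1).toNat (j-1).toNat + 1)
      else
        pvWr dp i.toNat j.toNat (max (pvRd dp (i-1).toNat j.toNat) (pvRd dp i.toNat (j-1).toNat))) dp) dp0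
  (n:Int) + (n:Int) - pvRd dp n n

-- ===== PORT B =====
def supersecuencia_palindromo_mas_corta_alt (s : String) : Int :=
  let cs := s.toList
  let n := cs.length
  let prev0 : List Int := (List.range (n+1)).map (fun (j : Nat) => (j:Int))   -- prev = list(range(n+1))
  let prev := (PySem.List.pyRange 1 ((n:Int)+1) 1).foldl (fun prev i =>
    (PySem.List.pyRange 1 ((n:Int)+1) 1).foldl (fun cur j =>
      if cs.getD (i-1).toNat ' ' = cs.getD ((n:Int)-j).toNat ' ' then  -- s[i-1] == s[n-j]; indices provably ≥ 0 and in range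
        cur ++ [prev.getD (j-1).toNat 0]                               -- cur.append(prev[j-1])
      else
        cur ++ [1 + min (prev.getD j.toNat 0) (cur.getD (j-1).toNat 0)]) [i]) prev0
  (n:Int) + PySem.Int.floordiv (prev.getD n 0) 2

-- ===== PRECONDITION & SPEC =====
def Spec_supersecuencia_palindromo_mas_corta (s : String) (out : Int) : Prop := out = supersecuencia_palindromo_mas_corta_alt s
instance (s : String) (out : Int) : Decidable (Spec_supersecuencia_palindromo_mas_corta s out) := by unfold Spec_supersecuencia_palindromo_mas_corta; infer_instance

-- ===== CLAIM (what is proved, stated in full; the proofs are below) =====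
def Claim_equal_supersecuencia_palindromo_mas_corta : Prop := ∀ (s : String), Dom_supersecuencia_palindromo_mas_corta s → Spec_supersecuencia_palindromo_mas_corta s (supersecuencia_palindromo_mas_corta s)

-- ===== LEMMAS AND PROOFS =====

-- small getD-of-set facts used by the A side (no such lemmas in Mathlib for getD)
lemma pvGetD_set_self {α : Type} (l : List α) (i : Nat) (a d : α) (h : i < l.length) :
    (l.set i a).getD i d = a := by
  simp [List.getD, List.getElem?_set_self h]

lemma pvGetD_set_ne {α : Type} (l : List α) (i k : Nat) (a d : α) (h : i ≠ k) :
    (l.set i a).getD k d = l.getD k d := by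
  simp [List.getD, List.getElem?_set_ne h]

-- getD-of-append facts used by the B side
lemma pvGetD_append_left (l : List Int) (v : Int) (j : Nat) (h : j < l.length) :
    (l ++ [v]).getD j 0 = l.getD j 0 := by
  simp [List.getD, List.getElem?_append_left h]

lemma pvGetD_append_last (l : List Int) (v : Int) :
    (l ++ [v]).getD l.length 0 = v := by
  simp [List.getD]

-- an (n+1)×(n+1) table
def pvShape (n : Nat) (dp : List (List Int)) : Prop :=
  dp.length = n+1 ∧ ∀ k, k < n+1 → (dp.getD k []).length = n+1

lemma pvShape_pvWr {n : Nat} {dp : List (List Int)} (hs : pvShape n dp)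
    {i j : Nat} (v : Int) : pvShape n (pvWr dp i j v) := by
  obtain ⟨h1, h2⟩ := hs
  refine ⟨by simp [pvWr, h1], ?_⟩
  intro k hk
  by_cases hki : k = i
  · subst hki
    rw [pvWr, pvGetD_set_self _ _ _ _ (by omega), List.length_set]
    exact h2 k hk
  · rw [pvWr, pvGetD_set_ne _ _ _ _ _ (by omega : i ≠ k)]
    exact h2 k hk

lemma pvRd_pvWr {n : Nat} {dp : List (List Int)} (hs : pvShape n dp)
    {i j : Nat} (hi : i ≤ n) (hj : j ≤ n) (v : Int) (i' j' : Nat) :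
    pvRd (pvWr dp i j v) i' j' = if i' = i ∧ j' = j then v else pvRd dp i' j' := by
  obtain ⟨h1, h2⟩ := hs
  by_cases hii : i' = i
  · subst hii
    rw [pvRd, pvWr, pvGetD_set_self _ _ _ _ (by omega)]
    by_cases hjj : j' = j
    · subst hjj
      rw [pvGetD_set_self _ _ _ _ (by rw [h2 i' (by omega)]; omega)]
      simp
    · rw [pvGetD_set_ne _ _ _ _ _ (by omega : j ≠ j')]
      simp [hjj, pvRd]
  · rw [pvRd, pvWr, pvGetD_set_ne _ _ _ _ _ (by omega : i ≠ i')]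
    simp [hii, pvRd]

-- the recurrence a nested i/j loop with cell formula f and initial values b computes
def pvF (f : Nat → Nat → Int → Int → Int → Int) (b : Nat → Nat → Int) : Nat → Nat → Int
  | 0, j => b 0 j
  | i+1, 0 => b (i+1) 0
  | i+1, j+1 => f (i+1) (j+1) (pvF f b i j) (pvF f b i (j+1)) (pvF f b (i+1) j)

@[simp] lemma pvF_zero_left (f b j) : pvF f b 0 j = b 0 j := by simp [pvF]
@[simp] lemma pvF_zero_right (f b i) : pvF f b i 0 = b i 0 := by cases i <;> simp [pvF]

lemma pvF_succ (f b) {i j : Nat} (hi : 1 ≤ i) (hj : 1 ≤ j) :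
    pvF f b i j = f i j (pvF f b (i-1) (j-1)) (pvF f b (i-1) j) (pvF f b i (j-1)) := by
  obtain ⟨i', rfl⟩ : ∃ k, i = k+1 := ⟨i-1, by omega⟩
  obtain ⟨j', rfl⟩ : ∃ k, j = k+1 := ⟨j-1, by omega⟩
  simp [pvF]

-- A's double loop, in Nat-index 2D-table form
def pvStep (f : Nat → Nat → Int → Int → Int → Int) (i : Nat) (dp : List (List Int)) (j : Nat) : List (List Int) :=
  pvWr dp i j (f i j (pvRd dp (i-1) (j-1)) (pvRd dp (i-1) j) (pvRd dp i (j-1)))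

def pvRow (f : Nat → Nat → Int → Int → Int → Int) (n i : Nat) (dp : List (List Int)) : List (List Int) :=
  (List.range n).foldl (fun dp l => pvStep f i dp (l+1)) dp

def pvTab (f : Nat → Nat → Int → Int → Int → Int) (n : Nat) (dp0 : List (List Int)) : List (List Int) :=
  (List.range n).foldl (fun dp k => pvRow f n (k+1) dp) dp0

lemma pvRow_aux (f : Nat → Nat → Int → Int → Int → Int) (b : Nat → Nat → Int)
    (n i : Nat) (hi1 : 1 ≤ i) (hi : i ≤ n) (dp : List (List Int))
    (hs : pvShape n dp)
    (h0 : ∀ i' j, i' ≤ n → j ≤ n → pvRd dp i' j = if i' < i then pvF f b i' j else b i' j) :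
    ∀ c, c ≤ n →
      pvShape n ((List.range c).foldl (fun dp l => pvStep f i dp (l+1)) dp) ∧
      (∀ i' j, i' ≤ n → j ≤ n →
        pvRd ((List.range c).foldl (fun dp l => pvStep f i dp (l+1)) dp) i' j =
          if i' < i then pvF f b i' j
          else if i' = i ∧ 1 ≤ j ∧ j ≤ c then pvF f b i j
          else b i' j) := by
  intro c
  induction c with
  | zero =>
    intro _
    refine ⟨by simpa using hs, ?_⟩
    intro i' j hi' hj
    simp only [List.range_zero, List.foldl_nil]
    rw [h0 i' j hi' hj]
    split_ifs with h1 h2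
    · rfl
    · omega
    · rfl
  | succ c ih =>
    intro hc
    obtain ⟨ihs, ihv⟩ := ih (by omega)
    rw [List.range_succ, List.foldl_append, List.foldl_cons, List.foldl_nil]
    set dp' := (List.range c).foldl (fun dp l => pvStep f i dp (l+1)) dp with hdp'
    have hr1 : pvRd dp' (i-1) c = pvF f b (i-1) c := by
      rw [ihv (i-1) c (by omega) (by omega), if_pos (by omega : i-1 < i)]
    have hr2 : pvRd dp' (i-1) (c+1) = pvF f b (i-1) (c+1) := by
      rw [ihv (i-1) (c+1) (by omega) (by omega), if_pos (by omega : i-1 < i)]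
    have hr3 : pvRd dp' i c = pvF f b i c := by
      rw [ihv i c (by omega) (by omega), if_neg (by omega)]
      rcases Nat.eq_zero_or_pos c with rfl | hc1
      · rw [if_neg (by omega)]; simp
      · rw [if_pos ⟨rfl, hc1, le_rfl⟩]
    have hv : f i (c+1) (pvRd dp' (i-1) ((c+1)-1)) (pvRd dp' (i-1) (c+1)) (pvRd dp' i ((c+1)-1))
        = pvF f b i (c+1) := by
      simp only [Nat.add_sub_cancel, hr1, hr2, hr3]
      rw [pvF_succ f b hi1 (by omega : 1 ≤ c+1)]
      simp
    refine ⟨pvShape_pvWr ihs _, ?_⟩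
    intro i' j hi' hj
    rw [pvStep, pvRd_pvWr ihs hi (by omega) _ i' j]
    by_cases hw : i' = i ∧ j = c + 1
    · obtain ⟨rfl, rfl⟩ := hw
      rw [if_pos ⟨rfl, rfl⟩, if_neg (by omega), if_pos ⟨rfl, by omega, le_rfl⟩]
      exact hv
    · rw [if_neg hw, ihv i' j hi' hj]
      by_cases g1 : i' < i
      · rw [if_pos g1, if_pos g1]
      · rw [if_neg g1, if_neg g1]
        by_cases g2 : i' = i ∧ 1 ≤ j ∧ j ≤ c
        · rw [if_pos g2, if_pos ⟨g2.1, g2.2.1, by omega⟩]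
        · rw [if_neg g2, if_neg (by
            rintro ⟨rfl, hj1, hj2⟩
            rcases Nat.lt_or_ge j (c+1) with h | h
            · exact g2 ⟨rfl, hj1, by omega⟩
            · exact hw ⟨rfl, by omega⟩)]

theorem pvTab_spec (f : Nat → Nat → Int → Int → Int → Int) (b : Nat → Nat → Int) (n : Nat)
    (dp0 : List (List Int)) (hs : pvShape n dp0)
    (hb : ∀ i j, i ≤ n → j ≤ n → pvRd dp0 i j = b i j) :
    ∀ i j, i ≤ n → j ≤ n → pvRd (pvTab f n dp0) i j = pvF f b i j := by
  suffices H : ∀ m, m ≤ n →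
      pvShape n ((List.range m).foldl (fun dp k => pvRow f n (k+1) dp) dp0) ∧
      (∀ i j, i ≤ n → j ≤ n →
        pvRd ((List.range m).foldl (fun dp k => pvRow f n (k+1) dp) dp0) i j =
          if i ≤ m then pvF f b i j else b i j) by
    intro i j hi hj
    rw [pvTab, (H n le_rfl).2 i j hi hj, if_pos hi]
  intro m
  induction m with
  | zero =>
    intro _
    refine ⟨hs, ?_⟩
    intro i j hi hj
    rw [List.range_zero, List.foldl_nil, hb i j hi hj]
    split_ifs with h
    · have hz : i = 0 := by omega
      subst hz
      simp
    · rfl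
  | succ m ih =>
    intro hm
    obtain ⟨ihs, ihv⟩ := ih (by omega)
    rw [List.range_succ, List.foldl_append, List.foldl_cons, List.foldl_nil]
    set dp' := (List.range m).foldl (fun dp k => pvRow f n (k+1) dp) dp0 with hdp'
    have h0 : ∀ i' j, i' ≤ n → j ≤ n → pvRd dp' i' j = if i' < m+1 then pvF f b i' j else b i' j := by
      intro i' j hi' hj
      rw [ihv i' j hi' hj]
      by_cases g : i' ≤ m
      · rw [if_pos g, if_pos (by omega)]
      · rw [if_neg g, if_neg (by omega)]
    obtain ⟨rs, rv⟩ := pvRow_aux f b n (m+1) (by omega) (by omega) dp' ihs h0 n le_rfl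
    refine ⟨rs, ?_⟩
    intro i j hi hj
    rw [pvRow, rv i j hi hj]
    by_cases g1 : i < m+1
    · rw [if_pos g1, if_pos (by omega)]
    · rw [if_neg g1]
      by_cases g2 : i = m+1
      · subst g2
        rcases Nat.eq_zero_or_pos j with rfl | hj1
        · rw [if_neg (by omega), if_pos (by omega)]
          simp
        · rw [if_pos ⟨rfl, hj1, hj⟩, if_pos (by omega)]
      · rw [if_neg (by rintro ⟨rfl, _, _⟩; exact g2 rfl), if_neg (by omega)]

-- bridging the ports' Int pyRange folds to Nat-index folds (any state type)
lemma pyloop_eq {α : Type} (n : Nat) (g : α → Int → α) (a : α) :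
    (PySem.List.pyRange 1 ((n:Int)+1) 1).foldl g a
      = (List.range n).foldl (fun a (k : Nat) => g a ((k:Int)+1)) a := by
  rw [PySem.List.pyRange_one]
  have h : (((n:Int)+1) - 1).toNat = n := by omega
  rw [h, List.foldl_map]
  exact PySem.List.foldl_congr_mem _ _ _ _ (fun acc x _ => by norm_num [add_comm])

lemma portA_tab (cs rev : List Char) (n : Nat) (dp0 : List (List Int)) :
    ((PySem.List.pyRange 1 ((n:Int)+1) 1).foldl (fun dp i =>
      (PySem.List.pyRange 1 ((n:Int)+1) 1).foldl (fun dp j =>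
        if cs.getD (i-1).toNat ' ' = rev.getD (j-1).toNat ' ' then
          pvWr dp i.toNat j.toNat (pvRd dp (i-1).toNat (j-1).toNat + 1)
        else
          pvWr dp i.toNat j.toNat (max (pvRd dp (i-1).toNat j.toNat) (pvRd dp i.toNat (j-1).toNat))) dp) dp0)
    = pvTab (fun i j a u l => if cs.getD (i-1) ' ' = rev.getD (j-1) ' ' then a + 1 else max u l) n dp0 := by
  rw [pyloop_eq, pvTab]
  congr 1
  funext dp k
  rw [pyloop_eq, pvRow]
  apply PySem.List.foldl_congr_mem
  intro acc l _
  have e1 : ((k:Int)+1-1).toNat = k := by omega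
  have e2 : ((k:Int)+1).toNat = k+1 := by omega
  have e3 : ((l:Int)+1-1).toNat = l := by omega
  have e4 : ((l:Int)+1).toNat = l+1 := by omega
  simp only [e1, e2, e3, e4, pvStep, Nat.add_sub_cancel]
  split_ifs <;> rfl

-- B's rolling row, in Nat-index form: one row built by appending cells
def pvCell (f : Nat → Nat → Int → Int → Int → Int) (prev : List Int) (i : Nat) (cur : List Int) (j : Nat) : List Int :=
  cur ++ [f i j (prev.getD (j-1) 0) (prev.getD j 0) (cur.getD (j-1) 0)]

lemma portB_roll (cs : List Char) (n : Nat) (b : Nat → Nat → Int)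
    (hb : ∀ k : Nat, b (k+1) 0 = ((k:Int)+1)) (prev0 : List Int) :
    ((PySem.List.pyRange 1 ((n:Int)+1) 1).foldl (fun prev i =>
      (PySem.List.pyRange 1 ((n:Int)+1) 1).foldl (fun cur j =>
        if cs.getD (i-1).toNat ' ' = cs.getD ((n:Int)-j).toNat ' ' then
          cur ++ [prev.getD (j-1).toNat 0]
        else
          cur ++ [1 + min (prev.getD j.toNat 0) (cur.getD (j-1).toNat 0)]) [i]) prev0)
    = (List.range n).foldl (fun prev k =>
        (List.range n).foldl
          (fun cur l => pvCell (fun i j a u lf => if cs.getD (i-1) ' ' = cs.getD (n-j) ' ' then a else 1 + min u lf) prev (k+1) cur (l+1))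
          [b (k+1) 0]) prev0 := by
  rw [pyloop_eq]
  congr 1
  funext prev k
  rw [pyloop_eq, hb k]
  apply PySem.List.foldl_congr_mem
  intro acc l hl
  have hln : l < n := List.mem_range.mp hl
  have e1 : ((k:Int)+1-1).toNat = k := by omega
  have e3 : ((l:Int)+1-1).toNat = l := by omega
  have e4 : ((l:Int)+1).toNat = l+1 := by omega
  have e5 : ((n:Int)-((l:Int)+1)).toNat = n - (l+1) := by omega
  simp only [e1, e3, e4, e5, pvCell, Nat.add_sub_cancel]
  split_ifs <;> rfl

lemma pvRowB_aux (f : Nat → Nat → Int → Int → Int → Int) (b : Nat → Nat → Int)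
    (n i : Nat) (hi1 : 1 ≤ i) (prev : List Int)
    (hp : ∀ j, j ≤ n → prev.getD j 0 = pvF f b (i-1) j) :
    ∀ c, c ≤ n →
      ((List.range c).foldl (fun cur l => pvCell f prev i cur (l+1)) [b i 0]).length = c + 1 ∧
      ∀ j, j ≤ c → ((List.range c).foldl (fun cur l => pvCell f prev i cur (l+1)) [b i 0]).getD j 0 = pvF f b i j := by
  intro c
  induction c with
  | zero =>
    intro _
    refine ⟨by simp, ?_⟩
    intro j hj
    have hz : j = 0 := by omega
    subst hz
    simp [List.getD]
  | succ c ih =>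
    intro hc
    obtain ⟨ihl, ihv⟩ := ih (by omega)
    rw [List.range_succ, List.foldl_append, List.foldl_cons, List.foldl_nil]
    set cur := (List.range c).foldl (fun cur l => pvCell f prev i cur (l+1)) [b i 0] with hcur
    refine ⟨by simp [pvCell, ihl], ?_⟩
    intro j hj
    rcases Nat.lt_or_ge j (c+1) with h | h
    · rw [pvCell, pvGetD_append_left _ _ _ (by omega)]
      exact ihv j (by omega)
    · have hz : j = c + 1 := by omega
      subst hz
      have hlast : cur.length = c + 1 := ihl
      rw [pvCell, show c + 1 - 1 = c from rfl, ← hlast, pvGetD_append_last, hlast]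
      rw [hp c (by omega), hp (c+1) (by omega), ihv c (by omega)]
      rw [pvF_succ f b hi1 (by omega : 1 ≤ c+1)]
      simp

lemma pvRollB (f : Nat → Nat → Int → Int → Int → Int) (b : Nat → Nat → Int)
    (n : Nat) (prev0 : List Int) (h0 : ∀ j, j ≤ n → prev0.getD j 0 = b 0 j) :
    ∀ m, m ≤ n → ∀ j, j ≤ n →
      ((List.range m).foldl (fun prev k =>
        (List.range n).foldl (fun cur l => pvCell f prev (k+1) cur (l+1)) [b (k+1) 0]) prev0).getD j 0
      = pvF f b m j := by
  intro m
  induction m with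
  | zero =>
    intro _ j hj
    simpa using h0 j hj
  | succ m ih =>
    intro hm j hj
    rw [List.range_succ, List.foldl_append, List.foldl_cons, List.foldl_nil]
    exact (pvRowB_aux f b n (m+1) (by omega)
      ((List.range m).foldl (fun prev k =>
        (List.range n).foldl (fun cur l => pvCell f prev (k+1) cur (l+1)) [b (k+1) 0]) prev0)
      (fun j hjn => ih (by omega) j hjn) n le_rfl).2 j hj

-- the duality: B's min-distance recurrence is i + j - 2 × A's LCS recurrence
lemma dual (cs : List Char) (n : Nat) (hn : cs.length = n) :
    ∀ i, i ≤ n → ∀ j, j ≤ n →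
      pvF (fun i j a u l => if cs.getD (i-1) ' ' = cs.getD (n-j) ' ' then a else 1 + min u l)
          (fun (i j : Nat) => if i = 0 then (j:Int) else if j = 0 then (i:Int) else 0) i j
      = (i:Int) + (j:Int)
        - 2 * pvF (fun i j a u l => if cs.getD (i-1) ' ' = cs.reverse.getD (j-1) ' ' then a + 1 else max u l)
          (fun _ _ => 0) i j := by
  intro i
  induction i with
  | zero =>
    intro _ j hj
    simp
  | succ i ihi =>
    intro hi j
    induction j with
    | zero =>
      intro _
      simp
    | succ j ihj =>
      intro hj
      have hrev : cs.reverse.getD ((j+1)-1) ' ' = cs.getD (n-(j+1)) ' ' := by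
        have h1 : j < cs.length := by omega
        simp only [Nat.add_sub_cancel, List.getD]
        rw [List.getElem?_reverse h1, hn, show n - 1 - j = n - (j+1) from by omega]
      simp only [pvF]
      rw [hrev]
      have e1 := ihi (by omega) j (by omega)
      have e2 := ihi (by omega) (j+1) (by omega)
      have e3 := ihj (by omega)
      simp only [Nat.add_sub_cancel] at *
      split_ifs with h
      · rw [e1]; push_cast; ring
      · rw [e2, e3]; push_cast; omega

-- shapes and initial values of the ports' tables
lemma shapeA (n : Nat) : pvShape n (List.replicate (n+1) (List.replicate (n+1) (0:Int))) := by
  refine ⟨by simp, ?_⟩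
  intro k hk
  rw [List.getD, List.getElem?_replicate, if_pos hk]
  simp

lemma initA (n : Nat) : ∀ i j, i ≤ n → j ≤ n →
    pvRd (List.replicate (n+1) (List.replicate (n+1) (0:Int))) i j = (fun _ _ => (0:Int)) i j := by
  intro i j hi hj
  simp only [pvRd, List.getD]
  rw [List.getElem?_replicate, if_pos (by omega : i < n+1)]
  simp only [Option.getD_some, List.getElem?_replicate]
  split_ifs <;> rfl

lemma initB (n : Nat) : ∀ j, j ≤ n →
    ((List.range (n+1)).map (fun (j : Nat) => (j:Int))).getD j 0
    = (fun (i j : Nat) => if i = 0 then (j:Int) else if j = 0 then (i:Int) else 0) 0 j := by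
  intro j hj
  simp only [List.getD]
  rw [List.getElem?_map, List.getElem?_range (by omega : j < n+1)]
  simp

-- ===== VERDICT (by name: the statement is the Claim_ definition above) =====
theorem supersecuencia_palindromo_mas_corta_spec : Claim_equal_supersecuencia_palindromo_mas_corta := by
  intro s _
  unfold Spec_supersecuencia_palindromo_mas_corta
  unfold supersecuencia_palindromo_mas_corta supersecuencia_palindromo_mas_corta_alt
  simp only [portA_tab]
  rw [portB_roll s.toList s.toList.length
        (fun (i j : Nat) => if i = 0 then (j:Int) else if j = 0 then (i:Int) else 0)
        (fun k => by push_cast; simp)]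
  rw [pvTab_spec _ (fun _ _ => (0:Int)) s.toList.length _ (shapeA _) (initA _) _ _ le_rfl le_rfl]
  rw [pvRollB (fun i j a u lf => if s.toList.getD (i-1) ' ' = s.toList.getD (s.toList.length-j) ' ' then a else 1 + min u lf)
        (fun (i j : Nat) => if i = 0 then (j:Int) else if j = 0 then (i:Int) else 0)
        s.toList.length _ (initB _) _ le_rfl _ le_rfl]
  rw [dual s.toList s.toList.length rfl _ le_rfl _ le_rfl]
  set n := s.toList.length
  set L := pvF (fun i j a u l => if s.toList.getD (i-1) ' ' = s.toList.reverse.getD (j-1) ' ' then a + 1 else max u l)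
    (fun _ _ => 0) n n with hL
  rw [PySem.Int.floordiv_eq_ediv_of_pos (by norm_num)]
  have h2 : (n:Int) + (n:Int) - 2 * L = 2 * ((n:Int) - L) := by ring
  rw [h2, Int.mul_ediv_cancel_left _ (by norm_num)]
  ring
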